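-- pv_equiv track=rewrite | github.com/alivaezii/ATLAS | experiments/final/figure_style.py | cycle_colors
-- ===== SOURCE A (Python) =====
-- from typing import Iterable
--
-- PALETTE = {
--     "blue": "#0072B2",
--     "orange": "#E69F00",
--     "green": "#009E73",
--     "red": "#D55E00",
--     "purple": "#CC79A7",
--     "cyan": "#56B4E9",
--     "yellow": "#F0E442",
--     "black": "#000000",
--     "gray": "#666666",
-- }
--
-- def cycle_colors(names: Iterable[str]) -> list[str]:
--     base = [
--         PALETTE["blue"],
--         PALETTE["orange"],
--         PALETTE["green"],
--         PALETTE["red"],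
--         PALETTE["purple"],
--         PALETTE["cyan"],
--         PALETTE["black"],
--     ]
--     out = []
--     for i, _ in enumerate(names):
--         out.append(base[i % len(base)])
--     return out
-- ===== SOURCE B (Python) =====
-- PALETTE = {
--     "blue": "#0072B2",
--     "orange": "#E69F00",
--     "green": "#009E73",
--     "red": "#D55E00",
--     "purple": "#CC79A7",
--     "cyan": "#56B4E9",
--     "yellow": "#F0E442",
--     "black": "#000000",
--     "gray": "#666666",
-- }
--
-- def cycle_colors(names):
--     base = [
--         PALETTE["blue"],
--         PALETTE["orange"],
--         PALETTE["green"],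
--         PALETTE["red"],
--         PALETTE["purple"],
--         PALETTE["cyan"],
--         PALETTE["black"],
--     ]
--     n = sum(1 for _ in names)
--     reps = -(-n // len(base))
--     return (base * reps)[:n]
-- ===== Notes on version B (the rewrite author's own statement) =====
-- stated objective: alternative
-- what changed: Replaces the per-element enumerate/modulo-index append loop with a count-then-replicate decomposition: count the names in one pass, replicate the 7-color base palette ceil(n/7) times and slice to length n.
import Mathlib
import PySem

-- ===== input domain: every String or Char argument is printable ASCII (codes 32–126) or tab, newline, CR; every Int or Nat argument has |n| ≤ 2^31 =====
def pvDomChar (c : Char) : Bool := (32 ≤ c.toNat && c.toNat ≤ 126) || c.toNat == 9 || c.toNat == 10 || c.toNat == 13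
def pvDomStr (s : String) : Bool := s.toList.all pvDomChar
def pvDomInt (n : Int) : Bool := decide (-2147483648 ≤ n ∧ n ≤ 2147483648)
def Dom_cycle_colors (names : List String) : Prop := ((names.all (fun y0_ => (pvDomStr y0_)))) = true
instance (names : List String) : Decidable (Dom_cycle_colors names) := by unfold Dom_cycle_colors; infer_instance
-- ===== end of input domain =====

-- B replaces A's per-element enumerate/modulo append loop by a count-then-replicate-and-slice
-- decomposition (alternative structure, same O(n) cost).


-- ===== PORT A =====
-- the 7-element base palette both versions build from PALETTE
def pvBase : List String :=
  ["#0072B2", "#E69F00", "#009E73", "#D55E00", "#CC79A7", "#56B4E9", "#000000"]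

-- for i, _ in enumerate(names): out.append(base[i % len(base)])
-- (the index i % len(base) is always in range, so pyGetD's default is never used)
def cycle_colors (names : List String) : List String :=
  let base := pvBase
  (PySem.List.enumerate names).foldl
    (fun out p => out ++ [PySem.List.pyGetD base (PySem.Int.mod p.1 (base.length : Int)) ""]) []

-- ===== PORT B =====
-- n = sum(1 for _ in names); reps = -(-n // len(base)); return (base * reps)[:n]
def cycle_colors_alt (names : List String) : List String :=
  let base := pvBase
  let n : Int := names.foldl (fun acc _ => acc + 1) 0
  let reps : Int := -(PySem.Int.floordiv (-n) (base.length : Int))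
  PySem.List.slice (PySem.List.pyRepeat base reps) none (some n)

-- ===== PRECONDITION & SPEC =====
def Spec_cycle_colors (names : List String) (out : List String) : Prop := out = cycle_colors_alt names
instance (names : List String) (out : List String) : Decidable (Spec_cycle_colors names out) := by unfold Spec_cycle_colors; infer_instance

-- ===== CLAIM (what is proved, stated in full; the proofs are below) =====
def Claim_equal_cycle_colors : Prop := ∀ (names : List String), Dom_cycle_colors names → Spec_cycle_colors names (cycle_colors names)

-- ===== LEMMAS AND PROOFS =====

-- the common normal form both programs compute
def pvCanon (m : Nat) : List String := (List.range m).map (fun j => pvBase.getD (j % 7) "")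

lemma pvA_fold (xs : List String) (s : Nat) (acc : List String) :
    (PySem.List.enumerate xs (s : Int)).foldl
      (fun out p => out ++ [PySem.List.pyGetD pvBase (PySem.Int.mod p.1 (pvBase.length : Int)) ""]) acc
    = acc ++ (List.range xs.length).map (fun j => pvBase.getD ((s + j) % 7) "") := by
  induction xs generalizing s acc with
  | nil => simp [PySem.List.enumerate_nil]
  | cons x xs ih =>
    rw [PySem.List.enumerate_cons]
    have hcast : (s : Int) + 1 = ((s + 1 : Nat) : Int) := by push_cast; ring
    simp only [List.foldl_cons, hcast, ih]
    have hmod : PySem.Int.mod (s : Int) ((pvBase.length : Nat) : Int)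
        = ((s % 7 : Nat) : Int) := by
      have h7 := PySem.Int.mod_natCast s 7
      simp only [pvBase, List.length_cons, List.length_nil] at h7 ⊢
      exact_mod_cast h7
    rw [hmod, PySem.List.pyGetD_natCast]
    rw [List.length_cons, List.range_succ_eq_map, List.map_cons, List.map_map,
      List.append_assoc, List.singleton_append]
    simp only [Nat.add_zero]
    congr 1
    congr 1
    apply List.map_congr_left
    intro j hj
    simp only [Function.comp_apply]
    have hh : s + 1 + j = s + Nat.succ j := by omega
    rw [hh]

lemma pvA_eq_canon (names : List String) : cycle_colors names = pvCanon names.length := by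
  have h := pvA_fold names 0 []
  simpa [cycle_colors, pvCanon, Nat.zero_add] using h

lemma pvCount_fold (xs : List String) (acc : Int) :
    xs.foldl (fun acc _ => acc + 1) acc = acc + (xs.length : Int) := by
  induction xs generalizing acc with
  | nil => simp
  | cons x xs ih => simp [ih]; ring

lemma pvFlatten_getElem? (r i : Nat) (h : i < 7 * r) :
    ((List.replicate r pvBase).flatten)[i]? = some (pvBase.getD (i % 7) "") := by
  induction r generalizing i with
  | zero => omega
  | succ r ih =>
    simp only [List.replicate_succ, List.flatten_cons]
    by_cases hi : i < 7
    · rw [List.getElem?_append_left (by simpa [pvBase] using hi), Nat.mod_eq_of_lt hi]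
      have h7 : i < pvBase.length := by simpa [pvBase] using hi
      simp [List.getD, List.getElem?_eq_getElem h7]
    · rw [Nat.not_lt] at hi
      rw [List.getElem?_append_right (by simpa [pvBase] using hi)]
      have hlen : i - pvBase.length = i - 7 := by simp [pvBase]
      rw [hlen, ih (i - 7) (by omega)]
      have hmod : (i - 7) % 7 = i % 7 := by omega
      rw [hmod]

lemma pvTake_flatten (r m : Nat) (hm : m ≤ 7 * r) :
    ((List.replicate r pvBase).flatten).take m = pvCanon m := by
  have hlen : ((List.replicate r pvBase).flatten).length = r * 7 := by
    simp [List.length_flatten, pvBase]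
  apply List.ext_getElem
  · simp [hlen, pvCanon]; omega
  · intro i h1 h2
    rw [List.getElem_take]
    have hi : i < 7 * r := by
      have := h2; simp [pvCanon] at this; omega
    have hg := pvFlatten_getElem? r i hi
    have hbnd : i < ((List.replicate r pvBase).flatten).length := by omega
    rw [List.getElem?_eq_getElem hbnd, Option.some_inj] at hg
    rw [hg]
    simp [pvCanon]

lemma pvB_eq_canon (names : List String) : cycle_colors_alt names = pvCanon names.length := by
  unfold cycle_colors_alt
  set m := names.length with hm
  have hcnt : names.foldl (fun acc _ => acc + 1) (0 : Int) = (m : Int) := by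
    simpa using pvCount_fold names 0
  simp only [hcnt]
  have hreps : -(PySem.Int.floordiv (-(m : Int)) ((pvBase.length : Nat) : Int))
      = (((m + 6) / 7 : Nat) : Int) := by
    have hb : ((pvBase.length : Nat) : Int) = 7 := by simp [pvBase]
    rw [hb, PySem.Int.neg_floordiv_neg_eq_iff_of_pos (by omega)]
    constructor <;> push_cast <;> omega
  rw [hreps, PySem.List.slice_to_natCast, PySem.List.pyRepeat]
  rw [Int.toNat_natCast]
  exact pvTake_flatten _ m (by omega)

-- ===== VERDICT (by name: the statement is the Claim_ definition above) =====
theorem cycle_colors_spec : Claim_equal_cycle_colors := by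
  intro names _
  unfold Spec_cycle_colors
  rw [pvA_eq_canon, pvB_eq_canon]
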